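-- pv_equiv track=rewrite | github.com/vvania-ssantos/digital-twin-motor | python/sensor_simulator.py | simulate_queue
-- ===== SOURCE A (Python) =====
-- def simulate_queue(arriving_items, capacity):
--     queue = []
--     current_queue = 0
--
--     for arriving in arriving_items:
--         current_queue += arriving
--         processed = min(current_queue, capacity)
--         current_queue -= processed
--         queue.append(current_queue)
--
--     return queue
-- ===== SOURCE B (Python) =====
-- def simulate_queue(arriving_items, capacity):
--     # Different algorithm: the backlog after step i equals
--     #   totals[i] - min(0, totals[0], ..., totals[i])
--     # where totals are the prefix sums of (arriving - capacity);
--     # the running minimum plays the role of everything ever processed away.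
--     # Pass 1: prefix sums of the net inflow per step.
--     totals = []
--     t = 0
--     for a in arriving_items:
--         t += a - capacity
--         totals.append(t)
--     # Pass 2: subtract the running minimum (seeded by the empty prefix, 0).
--     m = 0
--     out = []
--     for t in totals:
--         if t < m:
--             m = t
--         out.append(t - m)
--     return out
-- ===== Notes on version B (the rewrite author's own statement) =====
-- stated objective: alternative
-- what changed: Replaces the clamped-queue recurrence (min/processed bookkeeping each step) by a two-pass prefix-sum formulation: backlog[i] = prefix_sum(arriving - capacity)[i] minus the running minimum of those prefix sums seeded with 0.
import Mathlib
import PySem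

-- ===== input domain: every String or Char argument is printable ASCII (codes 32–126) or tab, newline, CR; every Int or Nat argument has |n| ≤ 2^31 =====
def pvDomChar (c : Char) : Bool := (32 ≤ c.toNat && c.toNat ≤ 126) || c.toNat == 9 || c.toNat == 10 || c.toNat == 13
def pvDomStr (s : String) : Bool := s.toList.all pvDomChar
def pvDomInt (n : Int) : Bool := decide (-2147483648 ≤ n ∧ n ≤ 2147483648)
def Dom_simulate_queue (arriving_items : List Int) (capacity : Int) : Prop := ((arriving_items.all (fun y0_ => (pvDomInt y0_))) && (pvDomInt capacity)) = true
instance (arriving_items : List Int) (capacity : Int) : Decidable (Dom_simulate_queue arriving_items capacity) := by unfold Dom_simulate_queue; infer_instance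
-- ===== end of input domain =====

-- B replaces A's clamped-queue recurrence by two staged passes: prefix sums of (a - capacity), then subtracting their running minimum; same O(n) cost (objective: alternative).
-- ===== PORT A =====
def simulate_queue (arriving_items : List Int) (capacity : Int) : List Int :=
  (arriving_items.foldl (fun (st : List Int × Int) arriving =>
      let current_queue := st.2 + arriving
      let processed := min current_queue capacity
      let current_queue := current_queue - processed
      (st.1 ++ [current_queue], current_queue)) ([], 0)).1

-- ===== PORT B =====
def simulate_queue_alt (arriving_items : List Int) (capacity : Int) : List Int :=
  -- Pass 1: prefix sums of the net inflow per step.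
  let totals := (arriving_items.foldl (fun (st : List Int × Int) a =>
      let t := st.2 + (a - capacity)
      (st.1 ++ [t], t)) ([], 0)).1
  -- Pass 2: subtract the running minimum (seeded by the empty prefix, 0).
  (totals.foldl (fun (st : List Int × Int) t =>
      let m := if t < st.2 then t else st.2
      (st.1 ++ [t - m], m)) ([], 0)).1

-- ===== PRECONDITION & SPEC =====
def Spec_simulate_queue (arriving_items : List Int) (capacity : Int) (out : List Int) : Prop := out = simulate_queue_alt arriving_items capacity
instance (arriving_items : List Int) (capacity : Int) (out : List Int) : Decidable (Spec_simulate_queue arriving_items capacity out) := by unfold Spec_simulate_queue; infer_instance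

-- ===== CLAIM (what is proved, stated in full; the proofs are below) =====
def Claim_equal_simulate_queue : Prop := ∀ (arriving_items : List Int) (capacity : Int), Dom_simulate_queue arriving_items capacity → Spec_simulate_queue arriving_items capacity (simulate_queue arriving_items capacity)

-- ===== LEMMAS AND PROOFS =====

-- recursive views of the three folds, used only by the proofs
def goA (capacity q : Int) : List Int → List Int
  | [] => []
  | a :: rest =>
      let cq := q + a
      let q' := cq - min cq capacity
      q' :: goA capacity q' rest

def goSums (capacity t : Int) : List Int → List Int
  | [] => []
  | a :: rest =>
      let t' := t + (a - capacity)
      t' :: goSums capacity t' rest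

def goMin (m : Int) : List Int → List Int
  | [] => []
  | t :: rest =>
      let m' := if t < m then t else m
      (t - m') :: goMin m' rest

lemma foldA_eq (capacity : Int) :
    ∀ (items acc : List Int) (q : Int),
      (items.foldl (fun (st : List Int × Int) arriving =>
        let current_queue := st.2 + arriving
        let processed := min current_queue capacity
        let current_queue := current_queue - processed
        (st.1 ++ [current_queue], current_queue)) (acc, q)).1
      = acc ++ goA capacity q items := by
  intro items
  induction items with
  | nil => intro acc q; simp [goA]
  | cons a rest ih => intro acc q; simp only [List.foldl_cons, goA]; rw [ih]; simp

lemma foldSums_eq (capacity : Int) :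
    ∀ (items acc : List Int) (t : Int),
      (items.foldl (fun (st : List Int × Int) a =>
        let t := st.2 + (a - capacity)
        (st.1 ++ [t], t)) (acc, t)).1
      = acc ++ goSums capacity t items := by
  intro items
  induction items with
  | nil => intro acc t; simp [goSums]
  | cons a rest ih => intro acc t; simp only [List.foldl_cons, goSums]; rw [ih]; simp

lemma foldMin_eq :
    ∀ (items acc : List Int) (m : Int),
      (items.foldl (fun (st : List Int × Int) t =>
        let m := if t < st.2 then t else st.2
        (st.1 ++ [t - m], m)) (acc, m)).1
      = acc ++ goMin m items := by
  intro items
  induction items with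
  | nil => intro acc m; simp [goMin]
  | cons t rest ih => intro acc m; simp only [List.foldl_cons, goMin]; rw [ih]; simp

-- the key identity: A's clamped queue equals prefix sum minus running minimum
lemma goA_eq_goMin_goSums (capacity : Int) :
    ∀ (items : List Int) (t m : Int),
      goA capacity (t - m) items = goMin m (goSums capacity t items) := by
  intro items
  induction items with
  | nil => intro t m; simp [goA, goSums, goMin]
  | cons a rest ih =>
      intro t m
      simp only [goA, goSums, goMin]
      have h1 : (t - m + a) - min (t - m + a) capacity
            = (t + (a - capacity)) - (if (t + (a - capacity)) < m then (t + (a - capacity)) else m) := by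
        split_ifs <;> omega
      simp only [h1]
      rw [ih]

-- ===== VERDICT (by name: the statement is the Claim_ definition above) =====
theorem simulate_queue_spec : Claim_equal_simulate_queue := by
  intro arriving_items capacity _
  unfold Spec_simulate_queue simulate_queue simulate_queue_alt
  rw [foldA_eq, foldSums_eq, foldMin_eq]
  simpa using goA_eq_goMin_goSums capacity arriving_items 0 0
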